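-- pv_equiv track=rewrite | github.com/cds-snc/sre-bot | app/integrations/slack/blocks.py | validate_blocks
-- ===== SOURCE A (Python) =====
-- from typing import Dict, List
--
-- def validate_blocks(blocks: List[Dict]) -> bool:
--     """
--     Validate that the provided blocks are valid Slack Block Kit structures.
--
--     This performs basic structural validation to catch common errors before
--     sending blocks to the Slack API. It's not exhaustive but covers the most
--     common block types and their required fields.
--
--     Args:
--         blocks: List of Slack block dictionaries to validate
--
--     Returns:
--         bool: True if blocks are structurally valid, False otherwise
--
--     Examples:
--         >>> blocks = [
--         ...     {"type": "section", "text": {"type": "mrkdwn", "text": "Hello"}},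
--         ...     {"type": "divider"}
--         ... ]
--         >>> validate_blocks(blocks)
--         True
--
--         >>> invalid_blocks = [{"text": "missing type"}]
--         >>> validate_blocks(invalid_blocks)
--         False
--     """
--     if not isinstance(blocks, list):
--         return False
--
--     for block in blocks:
--         if not isinstance(block, dict):
--             return False
--
--         if "type" not in block:
--             return False
--
--         # Basic validation for common block types
--         block_type = block.get("type")
--
--         # Section and header blocks require text
--         if block_type in ["section", "header"] and "text" not in block:
--             return False
--
--         # Divider blocks should be minimal
--         if block_type == "divider" and len(block) > 1:
--             return False
--
--         # Actions blocks require elements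
--         if block_type == "actions" and "elements" not in block:
--             return False
--
--         # Context blocks require elements
--         if block_type == "context" and "elements" not in block:
--             return False
--
--     return True
-- ===== SOURCE B (Python) =====
-- def _missing_type(block):
--     return "type" not in block
--
-- def _bad_text(block):
--     return block.get("type") in ("section", "header") and "text" not in block
--
-- def _bad_divider(block):
--     return block.get("type") == "divider" and len(block) > 1
--
-- def _bad_elements(block):
--     return block.get("type") in ("actions", "context") and "elements" not in block
--
-- _VIOLATIONS = (_missing_type, _bad_text, _bad_divider, _bad_elements)
--
-- def validate_blocks(blocks):
--     if not isinstance(blocks, list):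
--         return False
--     if any(not isinstance(b, dict) for b in blocks):
--         return False
--     # rule-major: each violation rule makes its own full pass over the blocks
--     return not any(any(rule(b) for b in blocks) for rule in _VIOLATIONS)
-- ===== Notes on version B (the rewrite author's own statement) =====
-- stated objective: alternative
-- what changed: Transposes the traversal: instead of one block-major pass running an if-chain of checks per block, B keeps a tuple of violation predicates and makes one staged full pass over the blocks per rule (rule-major), declaring the list valid iff no rule fires on any pass; correct because validity is a pure conjunction so scan order is irrelevant.
import Mathlib
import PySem

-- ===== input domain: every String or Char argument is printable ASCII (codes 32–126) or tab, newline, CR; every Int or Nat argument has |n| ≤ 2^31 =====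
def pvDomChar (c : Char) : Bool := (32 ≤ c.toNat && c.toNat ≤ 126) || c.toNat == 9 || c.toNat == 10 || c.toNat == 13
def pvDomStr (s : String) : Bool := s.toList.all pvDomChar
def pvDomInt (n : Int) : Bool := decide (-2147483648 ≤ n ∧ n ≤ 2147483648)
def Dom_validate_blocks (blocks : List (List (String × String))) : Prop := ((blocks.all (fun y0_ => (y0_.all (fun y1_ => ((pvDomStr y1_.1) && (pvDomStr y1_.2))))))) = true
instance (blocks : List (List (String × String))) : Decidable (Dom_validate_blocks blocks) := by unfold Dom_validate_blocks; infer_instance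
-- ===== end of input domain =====

-- B transposes the traversal: a tuple of violation rules, each scanning the whole
-- list in its own pass (rule-major), instead of A's single block-major if-chain pass
-- (alternative decomposition; same cost).


-- ===== PORT A =====
-- 'k in block' on a dict (blocks are dicts str -> str; exact: key membership)
def pvHasKey (block : List (String × String)) (k : String) : Bool :=
  block.any (fun kv => kv.1 == k)

-- block.get(k): first match, none if absent (exact for a dict's unique keys)
def pvGetKey? (block : List (String × String)) (k : String) : Option String :=
  (block.find? (fun kv => kv.1 == k)).map (·.2)

def validate_blocks (blocks : List (List (String × String))) : Bool :=
  match blocks with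
  | [] => true
  | block :: rest =>
    -- 'if "type" not in block: return False'
    if !pvHasKey block "type" then false
    else
      let bt := pvGetKey? block "type"
      -- section/header require text
      if (bt == some "section" || bt == some "header") && !pvHasKey block "text" then false
      -- divider must be minimal
      else if bt == some "divider" && decide (block.length > 1) then false
      -- actions require elements
      else if bt == some "actions" && !pvHasKey block "elements" then false
      -- context require elements
      else if bt == some "context" && !pvHasKey block "elements" then false
      else validate_blocks rest

-- ===== PORT B =====
def vMissingType (block : List (String × String)) : Bool :=
  !pvHasKey block "type"

def vBadText (block : List (String × String)) : Bool :=
  (pvGetKey? block "type" == some "section" || pvGetKey? block "type" == some "header")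
    && !pvHasKey block "text"

def vBadDivider (block : List (String × String)) : Bool :=
  pvGetKey? block "type" == some "divider" && decide (block.length > 1)

def vBadElements (block : List (String × String)) : Bool :=
  (pvGetKey? block "type" == some "actions" || pvGetKey? block "type" == some "context")
    && !pvHasKey block "elements"

def pvViolations : List (List (String × String) → Bool) :=
  [vMissingType, vBadText, vBadDivider, vBadElements]

def validate_blocks_alt (blocks : List (List (String × String))) : Bool :=
  -- rule-major: each rule makes its own full pass over the blocks
  !(pvViolations.any (fun rule => blocks.any (fun b => rule b)))

-- ===== PRECONDITION & SPEC =====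
def Spec_validate_blocks (blocks : List (List (String × String))) (out : Bool) : Prop := out = validate_blocks_alt blocks
instance (blocks : List (List (String × String))) (out : Bool) : Decidable (Spec_validate_blocks blocks out) := by unfold Spec_validate_blocks; infer_instance

-- ===== CLAIM (what is proved, stated in full; the proofs are below) =====
def Claim_equal_validate_blocks : Prop := ∀ (blocks : List (List (String × String))), Dom_validate_blocks blocks → Spec_validate_blocks blocks (validate_blocks blocks)

-- ===== LEMMAS AND PROOFS =====
-- a block violates some rule
def pvBad (block : List (String × String)) : Bool :=
  vMissingType block || vBadText block || vBadDivider block || vBadElements block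

-- transposing the two any-scans gives the same boolean
theorem any_swap (blocks : List (List (String × String))) :
    pvViolations.any (fun rule => blocks.any (fun b => rule b)) = blocks.any pvBad := by
  apply Bool.eq_iff_iff.mpr
  simp [pvViolations, pvBad, List.any_eq_true]
  constructor
  · rintro (⟨x,hx,hv⟩|⟨x,hx,hv⟩|⟨x,hx,hv⟩|⟨x,hx,hv⟩) <;> exact ⟨x, hx, by tauto⟩
  · rintro ⟨x,hx,hv⟩
    rcases hv with ((h|h)|h)|h
    · exact Or.inl ⟨x,hx,h⟩
    · exact Or.inr (Or.inl ⟨x,hx,h⟩)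
    · exact Or.inr (Or.inr (Or.inl ⟨x,hx,h⟩))
    · exact Or.inr (Or.inr (Or.inr ⟨x,hx,h⟩))

-- when the block has a 'type' key, get('type') is some
theorem hasKey_isSome (block : List (String × String)) (k : String) :
    pvHasKey block k = (pvGetKey? block k).isSome := by
  induction block with
  | nil => rfl
  | cons kv rest ih =>
    by_cases h : kv.1 = k
    · simp [pvHasKey, pvGetKey?, List.find?, h]
    · have hk : (kv.1 == k) = false := by simp [h]
      simp only [pvHasKey, List.any_cons, pvGetKey?, List.find?, hk, Bool.false_or]
      simpa [pvHasKey, pvGetKey?] using ih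

-- A's per-block if-chain succeeds (continues) iff the block violates no rule
theorem cons_step (block : List (String × String)) (rest : List (List (String × String))) :
    validate_blocks (block :: rest) = (!pvBad block && validate_blocks rest) := by
  rw [validate_blocks]
  unfold pvBad vMissingType vBadText vBadDivider vBadElements
  cases h : pvHasKey block "type" with
  | false =>
    have : pvGetKey? block "type" = none := by
      rw [hasKey_isSome] at h; exact Option.not_isSome_iff_eq_none.mp (by simp [h])
    simp [this]
  | true =>
    simp only [Bool.not_true, Bool.false_eq_true, if_false]
    cases pvGetKey? block "type" == some "section" <;>
    cases pvGetKey? block "type" == some "header" <;>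
    cases pvGetKey? block "type" == some "divider" <;>
    cases pvGetKey? block "type" == some "actions" <;>
    cases pvGetKey? block "type" == some "context" <;>
    cases pvHasKey block "text" <;>
    cases pvHasKey block "elements" <;>
    cases decide (block.length > 1) <;> simp

theorem validate_blocks_eq (blocks : List (List (String × String))) :
    validate_blocks blocks = validate_blocks_alt blocks := by
  unfold validate_blocks_alt
  rw [any_swap]
  induction blocks with
  | nil => rfl
  | cons block rest ih =>
    rw [cons_step, ih, List.any_cons]
    cases pvBad block <;> simp

-- ===== VERDICT (by name: the statement is the Claim_ definition above) =====
theorem validate_blocks_spec : Claim_equal_validate_blocks := by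
  intro blocks _
  unfold Spec_validate_blocks
  exact validate_blocks_eq blocks
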